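-- pv_equiv track=rewrite | github.com/Tri-1010/RR_ECL_WORKING | src/rollrate/lifecycle.py | extend_actual_info_with_portfolio
-- ===== SOURCE A (Python) =====
-- from typing import Dict
--
-- def extend_actual_info_with_portfolio(
--     actual_info_prod: Dict[tuple, int],
--     portfolio_name: str = "PORTFOLIO_ALL",
-- ):
--     """
--     actual_info_prod: {(product, cohort) -> max_actual_mob}
--     Trả về:
--         actual_info_all: gồm cả product và portfolio
--         trong đó:
--             (portfolio_name, cohort) = max_mob của tất cả product tại cohort đó
--     """
--
--     actual_info_port = {}
--
--     for (product, cohort), max_mob in actual_info_prod.items():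
--         key_port = (portfolio_name, cohort)
--         if key_port not in actual_info_port:
--             actual_info_port[key_port] = max_mob
--         else:
--             actual_info_port[key_port] = max(
--                 actual_info_port[key_port],
--                 max_mob
--             )
--
--     # Gộp lại: product-level + portfolio-level
--     actual_info_all = {**actual_info_prod, **actual_info_port}
--     return actual_info_all
-- ===== SOURCE B (Python) =====
-- def extend_actual_info_with_portfolio(
--     actual_info_prod,
--     portfolio_name="PORTFOLIO_ALL",
-- ):
--     # Pass 1: collect the distinct cohorts in first-occurrence order.
--     cohorts = []
--     for (_product, cohort) in actual_info_prod:
--         if cohort not in cohorts: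
--             cohorts.append(cohort)
--     # Pass 2: for each cohort, rescan the items for its maximum mob.
--     actual_info_port = {
--         (portfolio_name, c): max(
--             m for (_p, k), m in actual_info_prod.items() if k == c
--         )
--         for c in cohorts
--     }
--     # Merge: product-level entries, then portfolio-level entries.
--     out = dict(actual_info_prod)
--     out.update(actual_info_port)
--     return out
-- ===== Notes on version B (the rewrite author's own statement) =====
-- stated objective: alternative
-- what changed: A streams once over the items keeping a running-max dict keyed by (portfolio, cohort); B first lists the distinct cohorts, then for each cohort rescans the items with a max() over a filtering generator (a nested-scan, dict-free reduction), then merges via dict()+update.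
import Mathlib
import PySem

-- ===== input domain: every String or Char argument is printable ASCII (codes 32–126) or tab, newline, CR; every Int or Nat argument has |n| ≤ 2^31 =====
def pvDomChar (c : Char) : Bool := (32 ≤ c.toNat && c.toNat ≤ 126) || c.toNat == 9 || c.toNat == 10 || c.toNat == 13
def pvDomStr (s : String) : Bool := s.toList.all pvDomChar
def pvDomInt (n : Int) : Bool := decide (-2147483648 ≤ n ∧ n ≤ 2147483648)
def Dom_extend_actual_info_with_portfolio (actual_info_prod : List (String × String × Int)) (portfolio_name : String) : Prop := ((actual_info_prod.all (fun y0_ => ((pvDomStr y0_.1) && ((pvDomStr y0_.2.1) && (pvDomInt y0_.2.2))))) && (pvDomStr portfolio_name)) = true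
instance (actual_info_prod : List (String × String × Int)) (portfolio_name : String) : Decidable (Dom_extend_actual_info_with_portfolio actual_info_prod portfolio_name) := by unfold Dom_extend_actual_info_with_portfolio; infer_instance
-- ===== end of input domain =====

-- B replaces A's single streaming running-max pass with a dict-free nested-scan decomposition
-- (list the distinct cohorts, then rescan the items per cohort with max()); "alternative", not faster.
-- The dict parameter arrives as an association list; both ports read it as a Python dict
-- (PySem.Dict.ofList: duplicate keys overwrite, first position kept), exactly what the Python receives.

-- ===== PORT A =====
def extend_actual_info_with_portfolio (actual_info_prod : List (String × String × Int)) (portfolio_name : String) : List (String × String × Int) :=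
  let d : PySem.Dict (String × String) Int :=
    PySem.Dict.ofList (actual_info_prod.map (fun e => ((e.1, e.2.1), e.2.2)))
  -- for (product, cohort), max_mob in actual_info_prod.items(): streaming running max per cohort
  let actual_info_port : PySem.Dict (String × String) Int :=
    d.items.foldl (fun ap kv =>
      if !ap.contains (portfolio_name, kv.1.2) then
        ap.insert (portfolio_name, kv.1.2) kv.2
      else
        ap.insert (portfolio_name, kv.1.2) (max (ap.getD (portfolio_name, kv.1.2) 0) kv.2))
      PySem.Dict.empty
  -- {**actual_info_prod, **actual_info_port}
  let all := actual_info_port.items.foldl (fun acc kv => acc.insert kv.1 kv.2) d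
  all.items.map (fun kv => (kv.1.1, kv.1.2, kv.2))

-- ===== PORT B =====
def extend_actual_info_with_portfolio_alt (actual_info_prod : List (String × String × Int)) (portfolio_name : String) : List (String × String × Int) :=
  let d : PySem.Dict (String × String) Int :=
    PySem.Dict.ofList (actual_info_prod.map (fun e => ((e.1, e.2.1), e.2.2)))
  -- pass 1: if cohort not in cohorts: cohorts.append(cohort)  (= PySem.Set.add)
  let cohorts : List String :=
    d.items.foldl (fun cs kv => PySem.Set.add cs kv.1.2) PySem.Set.empty
  -- pass 2: dict comprehension; max(m for (_p, k), m in items if k == c); the generator is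
  -- nonempty for every c in cohorts, so the .getD 0 totalising Python's max() is never the result
  let actual_info_port : PySem.Dict (String × String) Int :=
    cohorts.foldl (fun ap c =>
      ap.insert (portfolio_name, c)
        ((PySem.List.max? ((d.items.filter (fun kv => kv.1.2 == c)).map (fun kv => kv.2)) (fun x => x)).getD 0))
      PySem.Dict.empty
  -- out = dict(actual_info_prod); out.update(actual_info_port)
  let all := d.update actual_info_port.items
  all.items.map (fun kv => (kv.1.1, kv.1.2, kv.2))

-- ===== PRECONDITION & SPEC =====
def Spec_extend_actual_info_with_portfolio (actual_info_prod : List (String × String × Int)) (portfolio_name : String) (out : List (String × String × Int)) : Prop := out = extend_actual_info_with_portfolio_alt actual_info_prod portfolio_name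
instance (actual_info_prod : List (String × String × Int)) (portfolio_name : String) (out : List (String × String × Int)) : Decidable (Spec_extend_actual_info_with_portfolio actual_info_prod portfolio_name out) := by unfold Spec_extend_actual_info_with_portfolio; infer_instance

-- ===== CLAIM (what is proved, stated in full; the proofs are below) =====
def Claim_equal_extend_actual_info_with_portfolio : Prop := ∀ (actual_info_prod : List (String × String × Int)) (portfolio_name : String), Dom_extend_actual_info_with_portfolio actual_info_prod portfolio_name → Spec_extend_actual_info_with_portfolio actual_info_prod portfolio_name (extend_actual_info_with_portfolio actual_info_prod portfolio_name)

-- ===== LEMMAS AND PROOFS =====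

def pvCoh (l : List ((String × String) × Int)) : List String :=
  PySem.Set.ofList (l.map (fun kv => kv.1.2))
def pvGrp (l : List ((String × String) × Int)) (c : String) : List Int :=
  (l.filter (fun kv => kv.1.2 == c)).map (fun kv => kv.2)
def pvMg (l : List ((String × String) × Int)) (c : String) : Int :=
  (PySem.List.max? (pvGrp l c) (fun x => x)).getD 0
def pvSpecD (pn : String) (l : List ((String × String) × Int)) : PySem.Dict (String × String) Int :=
  PySem.Dict.mk ((pvCoh l).map (fun c => ((pn, c), pvMg l c)))

lemma pvCoh_nodup (l : List ((String × String) × Int)) : (pvCoh l).Nodup :=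
  PySem.Set.nodup_ofList _

lemma pvB_cohorts (l : List ((String × String) × Int)) :
    l.foldl (fun cs kv => PySem.Set.add cs kv.1.2) PySem.Set.empty = pvCoh l := by
  have := PySem.Set.update_map_eq_foldl_add (s := (PySem.Set.empty : List String))
    (l := l) (f := fun kv => kv.1.2)
  rw [← this, PySem.Set.update_empty, pvCoh]

lemma pvB_fold (pn : String) (l : List ((String × String) × Int)) :
    (l.foldl (fun cs kv => PySem.Set.add cs kv.1.2) PySem.Set.empty).foldl
      (fun ap c => ap.insert (pn, c)
        ((PySem.List.max? ((l.filter (fun kv => kv.1.2 == c)).map (fun kv => kv.2)) (fun x => x)).getD 0))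
      PySem.Dict.empty = pvSpecD pn l := by
  rw [pvB_cohorts]
  apply PySem.Dict.ext
  rw [PySem.Dict.items_foldl_insert_fresh (pvCoh l)
      (fun c => (pn, c))
      (fun c => ((PySem.List.max? ((l.filter (fun kv => kv.1.2 == c)).map (fun kv => kv.2)) (fun x => x)).getD 0))
      PySem.Dict.empty
      (by intro a _; simp)
      (by exact (pvCoh_nodup l).map (fun a b h => by simpa using h))]
  simp [pvSpecD, pvMg, pvGrp, PySem.Dict.empty]

lemma pvGrp_ne_nil_of_mem {l : List ((String × String) × Int)} {c : String}
    (h : c ∈ pvCoh l) : pvGrp l c ≠ [] := by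
  rw [pvCoh, PySem.Set.mem_ofList] at h
  obtain ⟨kv, hkv, hc⟩ := List.mem_map.mp h
  simp only [pvGrp, ne_eq, List.map_eq_nil_iff, List.filter_eq_nil_iff]
  intro hall
  exact hall kv hkv (by simp [hc])

lemma pvGrp_append (l : List ((String × String) × Int)) (kv : (String × String) × Int) (c : String) :
    pvGrp (l ++ [kv]) c = pvGrp l c ++ (if kv.1.2 = c then [kv.2] else []) := by
  simp only [pvGrp, List.filter_append, List.map_append]
  congr 1
  by_cases h : kv.1.2 = c <;> simp [h]

lemma pvCoh_append (l : List ((String × String) × Int)) (kv : (String × String) × Int) :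
    pvCoh (l ++ [kv]) = if kv.1.2 ∈ pvCoh l then pvCoh l else pvCoh l ++ [kv.1.2] := by
  simp only [pvCoh, List.map_append, List.map_cons, List.map_nil,
    PySem.Set.ofList_eq_foldl, List.foldl_append, List.foldl_cons, List.foldl_nil]
  rw [← PySem.Set.ofList_eq_foldl]
  simp [PySem.Set.add, PySem.Set.ofList_eq_foldl]

lemma pvMg_append_ne (l : List ((String × String) × Int)) (kv : (String × String) × Int)
    (c : String) (h : kv.1.2 ≠ c) : pvMg (l ++ [kv]) c = pvMg l c := by
  simp [pvMg, pvGrp_append, h]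

lemma pvMg_append_new (l : List ((String × String) × Int)) (kv : (String × String) × Int)
    (h : pvGrp l kv.1.2 = []) : pvMg (l ++ [kv]) kv.1.2 = kv.2 := by
  simp [pvMg, pvGrp_append, h, PySem.List.max?_id_cons]

lemma pvMg_append_old (l : List ((String × String) × Int)) (kv : (String × String) × Int)
    (h : pvGrp l kv.1.2 ≠ []) : pvMg (l ++ [kv]) kv.1.2 = max (pvMg l kv.1.2) kv.2 := by
  obtain ⟨v, t, hvt⟩ := List.exists_cons_of_ne_nil h
  simp [pvMg, pvGrp_append, hvt, PySem.List.max?_id_cons, List.foldl_append]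

lemma pvSpecD_keys_nodup (pn : String) (l : List ((String × String) × Int)) :
    ((pvCoh l).map (fun c => ((pn, c), pvMg l c))).map Prod.fst |>.Nodup := by
  simp only [List.map_map, Function.comp_def]
  exact (pvCoh_nodup l).map (fun a b h => by simpa using h)

lemma pvA_fold (pn : String) (l : List ((String × String) × Int)) :
    l.foldl (fun ap kv =>
      if !ap.contains (pn, kv.1.2) then
        ap.insert (pn, kv.1.2) kv.2
      else
        ap.insert (pn, kv.1.2) (max (ap.getD (pn, kv.1.2) 0) kv.2))
      PySem.Dict.empty = pvSpecD pn l := by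
  induction l using List.reverseRecOn with
  | nil => simp [pvSpecD, pvCoh, PySem.Set.ofList_eq_foldl]; rfl
  | append_singleton l kv ih =>
    rw [List.foldl_append, List.foldl_cons, List.foldl_nil, ih]
    have hcont : (pvSpecD pn l).contains (pn, kv.1.2) = decide (kv.1.2 ∈ pvCoh l) := by
      rw [PySem.Dict.contains_eq_decide_mem_keys]
      simp [pvSpecD, PySem.Dict.keys, List.map_map, Function.comp_def]
    by_cases hmem : kv.1.2 ∈ pvCoh l
    · -- cohort already seen: running max branch
      have hcont' : (pvSpecD pn l).contains (pn, kv.1.2) = true := by simp [hcont, hmem]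
      rw [hcont', Bool.not_true, if_neg (by simp)]
      have hget : (pvSpecD pn l).getD (pn, kv.1.2) 0 = pvMg l kv.1.2 := by
        apply PySem.Dict.getD_of_mem_items
        · simp only [pvSpecD]
          exact List.mem_map.mpr ⟨kv.1.2, hmem, rfl⟩
        · exact pvSpecD_keys_nodup pn l
      rw [hget]
      apply PySem.Dict.ext
      rw [PySem.Dict.items_insert_of_contains _ _ hcont']
      simp only [pvSpecD, pvCoh_append, hmem, if_pos, List.map_map, Function.comp_def]
      apply List.map_congr_left
      intro c hc
      by_cases hceq : c = kv.1.2
      · subst hceq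
        simp [pvMg_append_old l kv (pvGrp_ne_nil_of_mem hmem), max_comm]
      · have : ¬ ((pn, c) == (pn, kv.1.2)) := by simp [hceq]
        simp [this, pvMg_append_ne l kv c (fun h => hceq h.symm)]
    · -- new cohort: fresh insert branch
      have hcont' : (pvSpecD pn l).contains (pn, kv.1.2) = false := by simp [hcont, hmem]
      rw [hcont', Bool.not_false, if_pos rfl]
      apply PySem.Dict.ext
      rw [PySem.Dict.items_insert_of_not_contains _ _ hcont']
      have hgrp : pvGrp l kv.1.2 = [] := by
        by_contra h
        apply hmem
        rw [pvCoh, PySem.Set.mem_ofList]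
        simp only [pvGrp, List.map_eq_nil_iff, List.filter_eq_nil_iff] at h
        push Not at h
        obtain ⟨x, hx, hxc⟩ := h
        exact List.mem_map.mpr ⟨x, hx, by simpa using hxc⟩
      rw [pvSpecD, pvSpecD, pvCoh_append, if_neg hmem, List.map_append]
      congr 1
      · apply List.map_congr_left
        intro c hc
        have hne : kv.1.2 ≠ c := fun h => hmem (h ▸ hc)
        rw [pvMg_append_ne l kv c hne]
      · simp [pvMg_append_new l kv hgrp]

-- ===== VERDICT (by name: the statement is the Claim_ definition above) =====
theorem extend_actual_info_with_portfolio_spec : Claim_equal_extend_actual_info_with_portfolio := by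
  intro l pn _
  unfold Spec_extend_actual_info_with_portfolio
  unfold extend_actual_info_with_portfolio extend_actual_info_with_portfolio_alt
  simp only []
  rw [pvA_fold, pvB_fold]
  rfl
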